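-- pv_equiv track=rewrite | github.com/davidmrutkowski/Cdc42ParticleFlows | analysisScripts/Figure3C/Cdc42Width_Heatmap.py | getMeshLists
-- ===== SOURCE A (Python) =====
-- def getMeshLists(xlist, ylist):
--     x_mesh_list = []
--     y_mesh_list = []
--
--     for j in range(0, len(xlist)):
--         tmp_x_list = []
--         tmp_y_list = []
--
--         for i in range(0, len(ylist)):
--             if len(x_mesh_list) <= i:
--                 x_mesh_list.append([xlist[j]])
--             else:
--                 x_mesh_list[i].append(xlist[j])
--
--             if len(y_mesh_list) <= i:
--                 y_mesh_list.append([ylist[i]])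
--             else:
--                 y_mesh_list[i].append(ylist[i])
--
--     return x_mesh_list, y_mesh_list
-- ===== SOURCE B (Python) =====
-- def getMeshLists(xlist, ylist):
--     # Guard: with an empty xlist the outer loop of the original never runs,
--     # so no rows are produced even if ylist is non-empty.
--     if not xlist:
--         return [], []
--     return [xlist[:] for _ in ylist], [[y] * len(xlist) for y in ylist]
-- ===== Notes on version B (the rewrite author's own statement) =====
-- stated objective: simpler
-- what changed: Replaces A's column-by-column double loop that grows/extends rows with a length check on every step by a guard for empty xlist plus two direct comprehensions (one copy of xlist per y, one constant row [y]*len(xlist) per y).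
import Mathlib
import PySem

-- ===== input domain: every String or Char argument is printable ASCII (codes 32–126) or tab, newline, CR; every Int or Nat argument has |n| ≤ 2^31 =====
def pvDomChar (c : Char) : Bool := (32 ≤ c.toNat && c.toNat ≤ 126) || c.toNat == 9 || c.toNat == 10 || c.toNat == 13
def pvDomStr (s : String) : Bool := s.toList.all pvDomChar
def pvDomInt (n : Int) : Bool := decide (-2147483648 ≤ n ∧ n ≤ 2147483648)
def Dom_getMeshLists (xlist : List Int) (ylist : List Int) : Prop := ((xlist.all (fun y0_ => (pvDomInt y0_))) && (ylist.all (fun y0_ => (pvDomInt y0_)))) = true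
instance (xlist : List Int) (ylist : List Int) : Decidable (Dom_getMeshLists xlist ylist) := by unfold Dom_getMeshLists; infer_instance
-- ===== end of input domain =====

-- B builds both meshes directly with comprehensions (one copy of xlist per y-row,
-- one constant row per y) instead of A's column-by-column grow-with-length-check loops; objective: simpler.


-- ===== PORT A =====
-- inner-loop body: one iteration of `for i in range(0, len(ylist))` at outer index j
def gmInner (xlist : List Int) (ylist : List Int) (j : Nat)
    (st : List (List Int) × List (List Int)) (i : Nat) : List (List Int) × List (List Int) :=
  let xm := if st.1.length ≤ i then st.1 ++ [[xlist.getD j 0]]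
            else st.1.set i (st.1.getD i [] ++ [xlist.getD j 0])
  let ym := if st.2.length ≤ i then st.2 ++ [[ylist.getD i 0]]
            else st.2.set i (st.2.getD i [] ++ [ylist.getD i 0])
  (xm, ym)

def getMeshLists (xlist : List Int) (ylist : List Int) : List (List Int) × List (List Int) :=
  (List.range xlist.length).foldl
    (fun st j => (List.range ylist.length).foldl (gmInner xlist ylist j) st)
    ([], [])

-- ===== PORT B =====
def getMeshLists_alt (xlist : List Int) (ylist : List Int) : List (List Int) × List (List Int) :=
  if xlist = [] then ([], [])
  else (ylist.map (fun _ => xlist), ylist.map (fun y => List.replicate xlist.length y))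

-- ===== PRECONDITION & SPEC =====
def Spec_getMeshLists (xlist : List Int) (ylist : List Int) (out : List (List Int) × List (List Int)) : Prop := out = getMeshLists_alt xlist ylist
instance (xlist : List Int) (ylist : List Int) (out : List (List Int) × List (List Int)) : Decidable (Spec_getMeshLists xlist ylist out) := by unfold Spec_getMeshLists; infer_instance

-- ===== CLAIM (what is proved, stated in full; the proofs are below) =====
def Claim_equal_getMeshLists : Prop := ∀ (xlist : List Int) (ylist : List Int), Dom_getMeshLists xlist ylist → Spec_getMeshLists xlist ylist (getMeshLists xlist ylist)

-- ===== LEMMAS AND PROOFS =====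

-- outer-loop state after k outer iterations
def gmState (xlist : List Int) (ylist : List Int) (k : Nat) : List (List Int) × List (List Int) :=
  if k = 0 then ([], [])
  else (List.replicate ylist.length (xlist.take k), ylist.map (fun y => List.replicate k y))

-- getD / set at the boundary between a prefix and a cons
theorem gm_getD_app {α : Type} (P : List α) (c : α) (Q : List α) (d : α) (s : Nat) (h : P.length = s) :
    (P ++ c :: Q).getD s d = c := by
  induction P generalizing s with
  | nil => subst h; rfl
  | cons p P ih =>
    subst h
    rw [List.cons_append, List.length_cons, List.getD_cons_succ]
    exact ih P.length rfl

theorem gm_set_app {α : Type} (P : List α) (c c' : α) (Q : List α) (s : Nat) (h : P.length = s) :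
    (P ++ c :: Q).set s c' = P ++ c' :: Q := by
  induction P generalizing s with
  | nil => subst h; rfl
  | cons p P ih =>
    subst h
    rw [List.cons_append, List.length_cons, List.set_cons_succ, ih P.length rfl,
        List.cons_append]

-- first outer iteration: starting from ([],[]) both lists grow by appending
theorem gmInner_empty (xlist ylist : List Int) (j : Nat) :
    ∀ (t s : Nat), s + t = ylist.length →
      (List.range' s t).foldl (gmInner xlist ylist j)
        (List.replicate s [xlist.getD j 0], (ylist.take s).map (fun y => [y]))
      = (List.replicate ylist.length [xlist.getD j 0], ylist.map (fun y => [y])) := by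
  intro t
  induction t with
  | zero =>
    intro s hs
    simp at hs
    simp [hs]
  | succ t ih =>
    intro s hs
    rw [List.range'_succ, List.foldl_cons]
    have hslt : s < ylist.length := by omega
    have hstep : gmInner xlist ylist j
        (List.replicate s [xlist.getD j 0], (ylist.take s).map (fun y => [y])) s
        = (List.replicate (s+1) [xlist.getD j 0], (ylist.take (s+1)).map (fun y => [y])) := by
      have hxc : (List.replicate s ([xlist.getD j 0] : List Int)).length ≤ s := by simp
      have hyc : ((ylist.take s).map (fun y => ([y] : List Int))).length ≤ s := by
        simp [List.length_take]
      unfold gmInner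
      dsimp only
      rw [if_pos hxc, if_pos hyc]
      refine Prod.ext ?_ ?_
      · dsimp only
        rw [List.replicate_succ' (n := s)]
      · dsimp only
        have hg : ylist.getD s 0 = ylist[s] := by
          rw [List.getD_eq_getElem?_getD, List.getElem?_eq_getElem hslt]; rfl
        rw [hg, List.map_take, List.map_take, List.take_add_one, List.getElem?_map,
            List.getElem?_eq_getElem hslt]
        simp
    rw [hstep]
    exact ih (s+1) (by omega)

-- later outer iterations: every row already exists and gets one element appended
theorem gmInner_full (xlist ylist : List Int) (j k : Nat) :
    ∀ (t s : Nat), s + t = ylist.length →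
      (List.range' s t).foldl (gmInner xlist ylist j)
        (List.replicate s (xlist.take k ++ [xlist.getD j 0]) ++ List.replicate t (xlist.take k),
         (ylist.take s).map (fun y => List.replicate (k+1) y) ++ (ylist.drop s).map (fun y => List.replicate k y))
      = (List.replicate ylist.length (xlist.take k ++ [xlist.getD j 0]),
         ylist.map (fun y => List.replicate (k+1) y)) := by
  intro t
  induction t with
  | zero =>
    intro s hs
    simp at hs
    simp [hs]
  | succ t ih =>
    intro s hs
    rw [List.range'_succ, List.foldl_cons]
    have hslt : s < ylist.length := by omega
    have hg : ylist.getD s 0 = ylist[s] := by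
      rw [List.getD_eq_getElem?_getD, List.getElem?_eq_getElem hslt]; rfl
    have hstep : gmInner xlist ylist j
        (List.replicate s (xlist.take k ++ [xlist.getD j 0]) ++ List.replicate (t+1) (xlist.take k),
         (ylist.take s).map (fun y => List.replicate (k+1) y) ++ (ylist.drop s).map (fun y => List.replicate k y)) s
        = (List.replicate (s+1) (xlist.take k ++ [xlist.getD j 0]) ++ List.replicate t (xlist.take k),
           (ylist.take (s+1)).map (fun y => List.replicate (k+1) y) ++ (ylist.drop (s+1)).map (fun y => List.replicate k y)) := by
      have hxc : ¬ ((List.replicate s (xlist.take k ++ [xlist.getD j 0]) ++ List.replicate (t+1) (xlist.take k)).length ≤ s) := by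
        simp
      have hyc : ¬ (((ylist.take s).map (fun y => List.replicate (k+1) y) ++ (ylist.drop s).map (fun y => List.replicate k y)).length ≤ s) := by
        simp [List.length_take]
        omega
      have hdrop : (ylist.drop s).map (fun y => List.replicate k y)
          = List.replicate k ylist[s] :: (ylist.drop (s+1)).map (fun y => List.replicate k y) := by
        rw [List.drop_eq_getElem_cons hslt, List.map_cons]
      have hrep : List.replicate (t+1) (xlist.take k) = xlist.take k :: List.replicate t (xlist.take k) := by
        rw [List.replicate_succ]
      have htk : (ylist.take (s+1)).map (fun y => List.replicate (k+1) y)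
          = (ylist.take s).map (fun y => List.replicate (k+1) y) ++ [List.replicate (k+1) ylist[s]] := by
        rw [List.map_take, List.map_take, List.take_add_one, List.getElem?_map,
            List.getElem?_eq_getElem hslt]
        simp
      unfold gmInner
      dsimp only
      rw [if_neg hxc, if_neg hyc]
      refine Prod.ext ?_ ?_
      · dsimp only
        rw [hrep,
            gm_getD_app _ _ _ _ s (by simp),
            gm_set_app _ _ _ _ s (by simp),
            List.replicate_succ' (n := s)]
        simp
      · dsimp only
        rw [hdrop,
            gm_getD_app _ _ _ _ s (by simp [List.length_take]; omega),
            gm_set_app _ _ _ _ s (by simp [List.length_take]; omega),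
            hg, htk]
        have : List.replicate k ylist[s] ++ [ylist[s]] = List.replicate (k+1) ylist[s] := by
          rw [List.replicate_succ']
        rw [this]
        simp
    rw [hstep]
    exact ih (s+1) (by omega)

-- one outer-loop step
theorem gmOuter_step (xlist ylist : List Int) (k : Nat) (hk : k < xlist.length) :
    (List.range ylist.length).foldl (gmInner xlist ylist k) (gmState xlist ylist k)
      = gmState xlist ylist (k+1) := by
  have htake : xlist.take (k+1) = xlist.take k ++ [xlist.getD k 0] := by
    have hg : xlist.getD k 0 = xlist[k] := by
      rw [List.getD_eq_getElem?_getD, List.getElem?_eq_getElem hk]; rfl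
    rw [List.take_add_one, List.getElem?_eq_getElem hk, hg]
    rfl
  rcases Nat.eq_zero_or_pos k with hk0 | hk1
  · subst hk0
    have h := gmInner_empty xlist ylist 0 ylist.length 0 (by omega)
    simp only [List.replicate_zero, List.take_zero, List.map_nil] at h
    rw [List.range_eq_range']
    have h0 : gmState xlist ylist 0 = ([], []) := rfl
    have h1 : gmState xlist ylist (0+1)
        = (List.replicate ylist.length (xlist.take 1), ylist.map (fun y => List.replicate 1 y)) := by
      simp [gmState]
    rw [h0, h1, h, htake]
    simp
  · rw [List.range_eq_range']
    have h := gmInner_full xlist ylist k k ylist.length 0 (by omega)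
    simp only [List.replicate_zero, List.take_zero, List.map_nil, List.nil_append,
      List.drop_zero] at h
    have h0 : gmState xlist ylist k
        = (List.replicate ylist.length (xlist.take k), ylist.map (fun y => List.replicate k y)) := by
      simp [gmState, Nat.pos_iff_ne_zero.mp hk1]
    have h1 : gmState xlist ylist (k+1)
        = (List.replicate ylist.length (xlist.take (k+1)), ylist.map (fun y => List.replicate (k+1) y)) := by
      simp [gmState]
    rw [h0, h1, h, htake]

-- whole outer loop
theorem gmOuter (xlist ylist : List Int) :
    ∀ (t k : Nat), k + t = xlist.length →
      (List.range' k t).foldl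
        (fun st j => (List.range ylist.length).foldl (gmInner xlist ylist j) st)
        (gmState xlist ylist k)
      = gmState xlist ylist xlist.length := by
  intro t
  induction t with
  | zero => intro k hk; simp at hk; simp [hk]
  | succ t ih =>
    intro k hk
    rw [List.range'_succ, List.foldl_cons, gmOuter_step xlist ylist k (by omega)]
    exact ih (k+1) (by omega)

theorem getMeshLists_eq_state (xlist ylist : List Int) :
    getMeshLists xlist ylist = gmState xlist ylist xlist.length := by
  have h := gmOuter xlist ylist xlist.length 0 (by omega)
  simpa [getMeshLists, gmState, List.range_eq_range'] using h

-- ===== VERDICT (by name: the statement is the Claim_ definition above) =====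
theorem getMeshLists_spec : Claim_equal_getMeshLists := by
  intro xlist ylist _
  unfold Spec_getMeshLists
  rw [getMeshLists_eq_state]
  unfold gmState getMeshLists_alt
  rcases eq_or_ne xlist [] with h | h
  · subst h; simp
  · have hn : xlist.length ≠ 0 := by simpa using h
    rw [if_neg hn, if_neg h, List.take_length]
    congr 1
    simp [List.map_const']
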